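-- pv_equiv track=rewrite | github.com/vlp4/study-python | lesson2/task6.py | analyze_goods
-- ===== SOURCE A (Python) =====
-- def analyze_goods(items):
--     attribute_values = {}
--     for good_item in items:
--         for attribute, value in good_item[1].items():
--             values = attribute_values.get(attribute)
--             if values is None:
--                 values = {}
--                 attribute_values[attribute] = values
--             values[value] = True
--     return {attr: list(values.keys()) for attr, values in attribute_values.items()}
-- ===== SOURCE B (Python) =====
-- def analyze_goods(items):
--     pairs = [(attribute, value)
--              for good_item in items
--              for attribute, value in good_item[1].items()]
--     result = {}
--     for attribute, _ in pairs:
--         if attribute in result: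
--             continue
--         seen = []
--         for attr2, value in pairs:
--             if attr2 == attribute and value not in seen:
--                 seen.append(value)
--         result[attribute] = seen
--     return result
-- ===== Notes on version B (the rewrite author's own statement) =====
-- stated objective: alternative
-- what changed: B flattens all items into one attribute/value pair list and then, for each first occurrence of an attribute, re-scans that whole list to collect its distinct values, instead of A's single-pass dict-of-dicts accumulator maintaining an ordered value-set inline; it trades A's linear dict bookkeeping for a simple quadratic rescan with no nested dict structure.
import Mathlib
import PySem

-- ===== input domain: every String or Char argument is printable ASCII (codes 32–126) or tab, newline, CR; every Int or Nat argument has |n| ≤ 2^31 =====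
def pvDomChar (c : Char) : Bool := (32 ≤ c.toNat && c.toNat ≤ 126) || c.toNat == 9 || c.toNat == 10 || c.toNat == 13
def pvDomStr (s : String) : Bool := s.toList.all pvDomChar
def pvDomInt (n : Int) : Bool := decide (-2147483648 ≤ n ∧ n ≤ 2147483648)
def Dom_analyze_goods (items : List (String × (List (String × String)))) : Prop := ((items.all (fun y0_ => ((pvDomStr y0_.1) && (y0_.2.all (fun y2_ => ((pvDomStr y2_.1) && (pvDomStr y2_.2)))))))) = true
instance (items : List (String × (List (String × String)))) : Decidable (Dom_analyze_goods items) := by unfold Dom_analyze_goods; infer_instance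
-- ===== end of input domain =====

-- B flattens the items to one attribute/value pair list, then for each first occurrence of an
-- attribute re-scans that whole list to collect its distinct values — no dict-of-dicts accumulator
-- (alternative decomposition; quadratic rescan instead of A's single-pass ordered-set maintenance).

-- ===== PORT A =====
def analyze_goods (items : List (String × (List (String × String)))) : List (String × List String) :=
  let attribute_values : PySem.Dict String (PySem.Dict String Bool) :=
    items.foldl (fun d good_item =>
      good_item.2.foldl (fun d p =>
        match d.get? p.1 with
        | none => d.insert p.1 ((PySem.Dict.empty : PySem.Dict String Bool).insert p.2 true)
        | some values => d.insert p.1 (values.insert p.2 true)) d)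
      PySem.Dict.empty
  attribute_values.items.map (fun p => (p.1, p.2.keys))

-- ===== PORT B =====
def analyze_goods_alt (items : List (String × (List (String × String)))) : List (String × List String) :=
  let pairs : List (String × String) := items.flatMap (fun good_item => good_item.2)
  let result : PySem.Dict String (List String) :=
    pairs.foldl (fun r p =>
      if r.contains p.1 then r
      else
        let seen := pairs.foldl (fun seen q =>
          if q.1 == p.1 && !(seen.contains q.2) then seen ++ [q.2] else seen) []
        r.insert p.1 seen) PySem.Dict.empty
  result.items

-- ===== PRECONDITION & SPEC =====
def Spec_analyze_goods (items : List (String × (List (String × String)))) (out : List (String × List String)) : Prop := out = analyze_goods_alt items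
instance (items : List (String × (List (String × String)))) (out : List (String × List String)) : Decidable (Spec_analyze_goods items out) := by unfold Spec_analyze_goods; infer_instance

-- ===== CLAIM (what is proved, stated in full; the proofs are below) =====
def Claim_equal_analyze_goods : Prop := ∀ (items : List (String × (List (String × String)))), Dom_analyze_goods items → Spec_analyze_goods items (analyze_goods items)

-- ===== LEMMAS AND PROOFS =====

-- A's inner step rewritten with getD (cases on whether the attribute is already present)
lemma stepA_eq (d : PySem.Dict String (PySem.Dict String Bool)) (p : String × String) :
    (match d.get? p.1 with
     | none => d.insert p.1 ((PySem.Dict.empty : PySem.Dict String Bool).insert p.2 true)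
     | some values => d.insert p.1 (values.insert p.2 true))
    = d.insert p.1 ((d.getD p.1 PySem.Dict.empty).insert p.2 true) := by
  cases h : d.get? p.1 <;> simp [PySem.Dict.getD_eq_get?_getD, h]

-- inserting a key into a Bool-valued dict adds it to the key set
lemma keys_insert_true (d : PySem.Dict String Bool) (v : String) :
    (d.insert v true).keys = PySem.Set.add d.keys v := by
  by_cases h : v ∈ d.keys
  · rw [PySem.Dict.keys_insert_of_contains d true
      (by simp [PySem.Dict.contains_eq_decide_mem_keys, h])]
    simp [PySem.Set.add, h]
  · rw [PySem.Dict.keys_insert_of_not_contains d true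
      (by simp [PySem.Dict.contains_eq_decide_mem_keys, h])]
    simp [PySem.Set.add, h]

-- A's per-attribute value set: keys of the sub-dict at a are the distinct filtered values
lemma A_value (l : List (String × String)) (a : String) :
    ∀ (d : PySem.Dict String (PySem.Dict String Bool)),
    ((l.foldl (fun d p => d.insert p.1 ((d.getD p.1 PySem.Dict.empty).insert p.2 true)) d).getD a PySem.Dict.empty).keys
      = PySem.Set.update (d.getD a PySem.Dict.empty).keys ((l.filter (fun q => q.1 == a)).map Prod.snd) := by
  induction l with
  | nil => intro d; simp [PySem.Set.update_nil]
  | cons p t ih =>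
    intro d
    simp only [List.foldl_cons, ih, PySem.Dict.getD_insert]
    by_cases h : p.1 = a
    · simp [h, keys_insert_true, PySem.Set.update_cons]
    · have h2 : ¬ a = p.1 := fun hh => h hh.symm
      have h' : (p.1 == a) = false := by simp [h]
      simp [h2, h']

-- B's inner rescan collects exactly the distinct filtered values, in order
lemma B_seen (a : String) (l : List (String × String)) :
    ∀ (s : List String),
    l.foldl (fun seen q => if q.1 == a && !(seen.contains q.2) then seen ++ [q.2] else seen) s
      = PySem.Set.update s ((l.filter (fun q => q.1 == a)).map Prod.snd) := by
  induction l with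
  | nil => intro s; simp [PySem.Set.update_nil]
  | cons q t ih =>
    intro s
    by_cases h : (q.1 == a) = true
    · have hstep : (if (q.1 == a && !(List.contains s q.2)) = true then s ++ [q.2] else s)
          = PySem.Set.add s q.2 := by
        rw [PySem.Set.add_eq_ite]
        by_cases hc : q.2 ∈ s <;> simp [h, hc]
      rw [List.foldl_cons, hstep, ih]
      simp [h, PySem.Set.update_cons]
    · have h0 : (q.1 == a) = false := by simpa using h
      have hstep : (if (q.1 == a && !(List.contains s q.2)) = true then s ++ [q.2] else s) = s := by
        simp [h0]
      rw [List.foldl_cons, hstep, ih]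
      simp [h0]

-- keys of B's conditional-insert fold
lemma B_keys (f : String → List String) (l : List (String × String)) :
    ∀ (d : PySem.Dict String (List String)),
    (l.foldl (fun r p => if r.contains p.1 then r else r.insert p.1 (f p.1)) d).keys
      = PySem.Set.update d.keys (l.map Prod.fst) := by
  induction l with
  | nil => intro d; simp [PySem.Set.update_nil]
  | cons p t ih =>
    intro d
    simp only [List.foldl_cons, List.map_cons, PySem.Set.update_cons, ih]
    by_cases h : d.contains p.1 = true
    · have hm : p.1 ∈ d.keys := (PySem.Dict.contains_iff_mem_keys d p.1).mp h
      rw [if_pos h, PySem.Set.add_of_mem hm]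
    · have hm : p.1 ∉ d.keys := fun hmem =>
        h ((PySem.Dict.contains_iff_mem_keys d p.1).mpr hmem)
      rw [if_neg h, PySem.Set.add_of_not_mem hm]
      congr 1
      exact PySem.Dict.keys_insert_of_not_contains d (f p.1) (by simpa using h)

-- lookups after B's conditional-insert fold: first insertion wins, never overwritten
lemma B_getD (f : String → List String) (l : List (String × String)) :
    ∀ (d : PySem.Dict String (List String)) (a : String),
    (l.foldl (fun r p => if r.contains p.1 then r else r.insert p.1 (f p.1)) d).getD a []
      = (if d.contains a then d.getD a []
         else if (l.map Prod.fst).contains a then f a else []) := by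
  induction l with
  | nil =>
    intro d a
    by_cases h : d.contains a = true
    · simp [h]
    · have h' : d.contains a = false := by simpa using h
      simp [h', PySem.Dict.getD_of_not_contains d [] h']
  | cons p t ih =>
    intro d a
    rw [List.foldl_cons]
    by_cases hd : d.contains p.1 = true
    · rw [if_pos hd, ih]
      by_cases ha : d.contains a = true
      · simp [ha]
      · have ha' : d.contains a = false := by simpa using ha
        have hne : (a == p.1) = false := beq_eq_false_iff_ne.mpr (fun he => by
          rw [he, hd] at ha'; cases ha')
        rw [if_neg ha, if_neg ha, List.map_cons, List.contains_cons, hne, Bool.false_or]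
    · rw [if_neg hd, ih]
      by_cases he : a = p.1
      · subst he
        simp [PySem.Dict.contains_insert_self, PySem.Dict.getD_insert_self, hd]
      · have hne : (a == p.1) = false := by simp [he]
        have hc : (d.insert p.1 (f p.1)).contains a = d.contains a := by
          rw [PySem.Dict.contains_insert, hne, Bool.false_or]
        rw [hc, PySem.Dict.getD_insert, if_neg he, List.map_cons, List.contains_cons, hne, Bool.false_or]

-- ===== VERDICT (by name: the statement is the Claim_ definition above) =====
theorem analyze_goods_spec : Claim_equal_analyze_goods := by
  intro items _
  unfold Spec_analyze_goods analyze_goods analyze_goods_alt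
  simp only [← List.foldl_flatMap]
  set pairs : List (String × String) := items.flatMap (fun g => g.2) with hp
  have hA : pairs.foldl (fun d p =>
      (match d.get? p.1 with
       | none => d.insert p.1 ((PySem.Dict.empty : PySem.Dict String Bool).insert p.2 true)
       | some values => d.insert p.1 (values.insert p.2 true))) PySem.Dict.empty
      = pairs.foldl (fun d p => d.insert p.1 ((d.getD p.1 PySem.Dict.empty).insert p.2 true)) PySem.Dict.empty := by
    apply List.foldl_ext
    intro d p _
    exact stepA_eq d p
  rw [hA]
  set f : String → List String := fun a =>
    pairs.foldl (fun seen q => if q.1 == a && !(seen.contains q.2) then seen ++ [q.2] else seen) [] with hf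
  set dA := pairs.foldl (fun d p => d.insert p.1 ((d.getD p.1 PySem.Dict.empty).insert p.2 true)) PySem.Dict.empty with hdA
  set dB := pairs.foldl (fun r p => if r.contains p.1 then r else r.insert p.1 (f p.1)) PySem.Dict.empty with hdB
  have ndA : dA.keys.Nodup := by
    rw [hdA]
    exact PySem.Dict.nodup_keys_foldl_insert_key pairs (fun p => p.1) _ _ (by simp)
  have hkB : dB.keys = PySem.Set.update [] (pairs.map Prod.fst) := by
    rw [hdB, B_keys]; rfl
  have ndB : dB.keys.Nodup := by
    rw [hkB]; exact PySem.Set.nodup_update _ _ (by simp)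
  have hkeys : dA.keys = dB.keys := by
    rw [hdA, hkB, PySem.Dict.keys_foldl_insert_key pairs (fun p => p.1)]; rfl
  rw [PySem.Dict.items_eq_map_keys dA ndA PySem.Dict.empty,
      PySem.Dict.items_eq_map_keys dB ndB [],
      List.map_map, hkeys]
  apply List.map_congr_left
  intro a ha
  have hmem : a ∈ pairs.map Prod.fst := by
    have := ha; rw [hkB] at this
    simpa [PySem.Set.update_nil_left, PySem.Set.mem_ofList] using this
  have hvA : (dA.getD a PySem.Dict.empty).keys
      = PySem.Set.update [] ((pairs.filter (fun q => q.1 == a)).map Prod.snd) := by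
    rw [hdA, A_value]; simp [PySem.Dict.getD_empty, PySem.Dict.keys_empty]
  have hvB : dB.getD a [] = f a := by
    rw [hdB, B_getD]
    simp [PySem.Dict.contains_empty, hmem]
  have hfa : f a = PySem.Set.update [] ((pairs.filter (fun q => q.1 == a)).map Prod.snd) := by
    rw [hf]; exact B_seen a pairs []
  simp [Function.comp, hvA, hvB, hfa]
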